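-- pv_equiv track=rewrite | github.com/NeoCortex97/EinfInf | Übung5/aufgabe_2.py | initCache
-- ===== SOURCE A (Python) =====
-- def mkKey(data=list()):
--     result = ""
--     for item in data:
--         result += str(item) + " "
--     return result[:-1]
--
-- def initCache(length=int()):
--     result = dict()
--     for i in range(length):
--         l = list()
--         for j in range(length):
--             if i == j:
--                 l.append(1)
--             else:
--                 l.append(0)
--         result[mkKey(l)] = -1
--     return result
-- ===== SOURCE B (Python) =====
-- def initCache(length=int()):
--     return {"0 " * i + "1" + " 0" * (length - 1 - i): -1 for i in range(length)}
-- ===== Notes on version B (the rewrite author's own statement) =====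
-- stated objective: simpler
-- what changed: Drops mkKey and the inner column loop entirely: each identity-row key is built in closed form by string repetition ('0 '*i + '1' + ' 0'*(length-1-i)) inside a dict comprehension over the single row loop.
import Mathlib
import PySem

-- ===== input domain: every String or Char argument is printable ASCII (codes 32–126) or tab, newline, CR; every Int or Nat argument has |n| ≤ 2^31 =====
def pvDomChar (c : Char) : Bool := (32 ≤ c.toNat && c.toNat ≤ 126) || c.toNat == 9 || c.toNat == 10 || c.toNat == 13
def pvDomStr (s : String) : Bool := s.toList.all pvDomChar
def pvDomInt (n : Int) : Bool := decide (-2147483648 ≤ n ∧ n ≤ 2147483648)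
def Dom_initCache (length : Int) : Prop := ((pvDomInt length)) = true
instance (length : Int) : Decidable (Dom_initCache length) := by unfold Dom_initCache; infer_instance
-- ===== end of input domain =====

-- B drops mkKey and the inner column loop, building each key in closed form by string repetition; objective: simpler.

-- ===== PORT A =====
-- string building ported over List Char with String.ofList (exact for '+=' concatenation); result[:-1] is PySem.Str.slice
def mkKey (data : List Int) : String :=
  PySem.Str.slice
    (String.ofList (data.foldl (fun r item => r ++ (PySem.Int.toStr item).toList ++ [' ']) []))
    none (some (-1))

def initCache (length : Int) : List (String × Int) :=
  ((PySem.List.pyRange 0 length 1).foldl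
    (fun d i =>
      let l := (PySem.List.pyRange 0 length 1).foldl
        (fun l j => l ++ [if i == j then (1 : Int) else 0]) []
      d.insert (mkKey l) (-1))
    PySem.Dict.empty).items

-- ===== PORT B =====
-- "0 " * i + "1" + " 0" * (length - 1 - i); Python string repetition is PySem.List.pyRepeat on the chars (exact)
def altKey (length i : Int) : String :=
  String.ofList (PySem.List.pyRepeat ['0', ' '] i ++ ['1'] ++ PySem.List.pyRepeat [' ', '0'] (length - 1 - i))

def initCache_alt (length : Int) : List (String × Int) :=
  ((PySem.List.pyRange 0 length 1).foldl
    (fun d i => d.insert (altKey length i) (-1))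
    PySem.Dict.empty).items

-- ===== PRECONDITION & SPEC =====
def Spec_initCache (length : Int) (out : List (String × Int)) : Prop := out = initCache_alt length
instance (length : Int) (out : List (String × Int)) : Decidable (Spec_initCache length out) := by unfold Spec_initCache; infer_instance

-- ===== CLAIM (what is proved, stated in full; the proofs are below) =====
def Claim_equal_initCache : Prop := ∀ (length : Int), Dom_initCache length → Spec_initCache length (initCache length)

-- ===== LEMMAS AND PROOFS =====

theorem foldl_append_g2 {α β : Type} (g : α → List β) (c : β) (l : List α) (init : List β) :
    l.foldl (fun r x => r ++ g x ++ [c]) init = init ++ l.flatMap (fun x => g x ++ [c]) := by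
  induction l generalizing init with
  | nil => simp
  | cons x xs ih => simp [List.foldl, List.append_assoc, List.flatMap]

theorem foldl_append_one {α β : Type} (f : α → β) (l : List α) (init : List β) :
    l.foldl (fun r x => r ++ [f x]) init = init ++ l.map f := by
  induction l generalizing init with
  | nil => simp
  | cons x xs ih => simp [List.foldl, ih]

theorem flatMap_const {α β : Type} (l : List α) (c : List β) :
    l.flatMap (fun _ => c) = (List.replicate l.length c).flatten := by
  induction l with
  | nil => simp
  | cons x xs ih => simp [List.replicate_succ, ih]

theorem shift_drop (k : ℕ) :
    (' ' :: (List.replicate k ['0', ' ']).flatten).dropLast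
      = (List.replicate k [' ', '0']).flatten := by
  induction k with
  | zero => simp
  | succ n ih =>
    simp only [List.replicate_succ, List.flatten_cons]
    simpa using ih

-- A's row-i key equals B's closed-form key, for every row index the loop visits
theorem key_eq (length i : Int) (h0 : 0 ≤ i) (h1 : i < length) :
    mkKey ((PySem.List.pyRange 0 length 1).foldl
      (fun l j => l ++ [if i == j then (1 : Int) else 0]) []) = altKey length i := by
  have hsplit : PySem.List.pyRange 0 length 1
      = PySem.List.pyRange 0 i 1 ++ (i :: PySem.List.pyRange (i+1) length 1) := by
    rw [PySem.List.pyRange_one_append 0 i length h0 (le_of_lt h1),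
        PySem.List.pyRange_one_cons h1]
  have htl : (mkKey ((PySem.List.pyRange 0 length 1).foldl
      (fun l j => l ++ [if i == j then (1 : Int) else 0]) [])).toList
      = (altKey length i).toList := by
    rw [mkKey, PySem.Str.slice_to_neg_one,
        foldl_append_one (fun j => if i == j then (1 : Int) else 0),
        foldl_append_g2 (fun item => (PySem.Int.toStr item).toList)]
    simp only [List.nil_append, List.flatMap_map]
    rw [hsplit]
    have hleft : (PySem.List.pyRange 0 i 1).flatMap
        (fun j => (PySem.Int.toStr (if i == j then (1:Int) else 0)).toList ++ [' '])
        = (List.replicate i.toNat ['0', ' ']).flatten := by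
      rw [show (PySem.List.pyRange 0 i 1).flatMap
            (fun j => (PySem.Int.toStr (if i == j then (1:Int) else 0)).toList ++ [' '])
          = (PySem.List.pyRange 0 i 1).flatMap (fun _ => ['0', ' ']) from ?_,
        flatMap_const, PySem.List.length_pyRange_one]
      · norm_num
      · apply List.flatMap_congr
        intro j hj
        have := (PySem.List.mem_pyRange_one.mp hj).2
        have hne : (i == j) = false := by simp; omega
        rw [hne]
        decide
    have hright : (PySem.List.pyRange (i+1) length 1).flatMap
        (fun j => (PySem.Int.toStr (if i == j then (1:Int) else 0)).toList ++ [' '])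
        = (List.replicate (length - 1 - i).toNat ['0', ' ']).flatten := by
      rw [show (PySem.List.pyRange (i+1) length 1).flatMap
            (fun j => (PySem.Int.toStr (if i == j then (1:Int) else 0)).toList ++ [' '])
          = (PySem.List.pyRange (i+1) length 1).flatMap (fun _ => ['0', ' ']) from ?_,
        flatMap_const, PySem.List.length_pyRange_one]
      · congr 2
        omega
      · apply List.flatMap_congr
        intro j hj
        have := (PySem.List.mem_pyRange_one.mp hj).1
        have hne : (i == j) = false := by simp; omega
        rw [hne]
        decide
    have hself : (PySem.Int.toStr (if i == i then (1:Int) else 0)).toList ++ [' '] = ['1', ' '] := by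
      simp only [BEq.rfl, if_pos]
      decide
    rw [List.flatMap_append, List.flatMap_cons, hleft, hself, hright]
    rw [altKey]
    simp only [PySem.List.pyRepeat]
    rw [show (['1', ' '] ++ (List.replicate (length - 1 - i).toNat ['0', ' ']).flatten)
        = '1' :: (' ' :: (List.replicate (length - 1 - i).toNat ['0', ' ']).flatten) from rfl]
    simp only [String.toList_ofList]
    rw [List.dropLast_append_of_ne_nil (by simp),
        List.dropLast_cons_of_ne_nil (by simp), shift_drop]
    simp [List.append_assoc]
  have := congrArg String.ofList htl
  simpa [String.ofList_toList] using this

theorem initCache_eq_alt (length : Int) : initCache length = initCache_alt length := by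
  unfold initCache initCache_alt
  have h : ∀ (d : PySem.Dict String Int),
      (PySem.List.pyRange 0 length 1).foldl
        (fun d i =>
          let l := (PySem.List.pyRange 0 length 1).foldl
            (fun l j => l ++ [if i == j then (1 : Int) else 0]) []
          d.insert (mkKey l) (-1)) d
      = (PySem.List.pyRange 0 length 1).foldl
        (fun d i => d.insert (altKey length i) (-1)) d := by
    intro d
    apply PySem.List.foldl_congr_mem
    intro d' i hi
    have hmem := PySem.List.mem_pyRange_one.mp hi
    simp only []
    rw [key_eq length i hmem.1 hmem.2]
  rw [h]

-- ===== VERDICT (by name: the statement is the Claim_ definition above) =====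
theorem initCache_spec : Claim_equal_initCache := fun length _ => initCache_eq_alt length
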